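-- pv_equiv track=rewrite | github.com/darkoss1/pysymex | benchmark_level4.py | level4_crc_like
-- ===== SOURCE A (Python) =====
-- def level4_crc_like(data: int) -> int:
--     """
--     CRC-like calculation with bit operations.
--     Tests bit-level constraint solving.
--     """
--     crc = data ^ 0xFFFFFFFF
--     for _ in range(8):
--         if crc & 1:
--             crc = (crc >> 1) ^ 0xEDB88320
--         else:
--             crc = crc >> 1
--
--     if crc == 0x12345678:
--         assert True, "CRC target reached!"
--         return crc
--     return crc
-- ===== SOURCE B (Python) =====
-- def _byte_crc(b):
--     c = b
--     for _ in range(8):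
--         if c & 1:
--             c = (c >> 1) ^ 0xEDB88320
--         else:
--             c = c >> 1
--     return c
--
-- _TABLE = [_byte_crc(b) for b in range(256)]
--
-- def level4_crc_like(data: int) -> int:
--     crc = data ^ 0xFFFFFFFF
--     return (crc >> 8) ^ _TABLE[crc & 0xFF]
-- ===== Notes on version B (the rewrite author's own statement) =====
-- stated objective: alternative
-- what changed: Replaced the 8-iteration per-bit conditional-xor loop by a single table-driven step: a 256-entry table precomputed once at import, then crc = (crc >> 8) ^ T[crc & 0xFF]; per-call bit-loop disappears.
import Mathlib
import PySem

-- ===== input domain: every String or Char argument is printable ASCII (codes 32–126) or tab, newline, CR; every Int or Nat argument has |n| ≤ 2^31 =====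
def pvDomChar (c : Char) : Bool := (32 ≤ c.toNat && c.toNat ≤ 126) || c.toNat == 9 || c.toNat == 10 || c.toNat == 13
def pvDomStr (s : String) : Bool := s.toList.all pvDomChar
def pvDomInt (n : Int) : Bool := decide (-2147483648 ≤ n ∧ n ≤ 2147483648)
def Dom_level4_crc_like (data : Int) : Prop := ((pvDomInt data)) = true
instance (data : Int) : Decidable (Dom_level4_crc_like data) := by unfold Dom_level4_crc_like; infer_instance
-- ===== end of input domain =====

-- B replaces A's 8-iteration per-bit loop by a single lookup in a precomputed 256-entry table
-- (the standard table-driven CRC reformulation); the return value is identical for every int.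

-- ===== PORT A =====
def level4_crc_like (data : Int) : Int :=
  let crc0 := PySem.Int.bxor data 4294967295
  let crc := (PySem.List.pyRange 0 8 1).foldl
    (fun crc _ =>
      if PySem.Int.band crc 1 ≠ 0 then PySem.Int.bxor (crc >>> (1:Nat)) 3988292384
      else crc >>> (1:Nat)) crc0
  if crc = 305419896 then crc else crc

-- ===== PORT B =====
-- _byte_crc from Source B
def byteCrc (b : Int) : Int :=
  (PySem.List.pyRange 0 8 1).foldl
    (fun c _ =>
      if PySem.Int.band c 1 ≠ 0 then PySem.Int.bxor (c >>> (1:Nat)) 3988292384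
      else c >>> (1:Nat)) b

-- _TABLE from Source B
def crcTable : List Int := (PySem.List.pyRange 0 256 1).map byteCrc

def level4_crc_like_alt (data : Int) : Int :=
  let crc := PySem.Int.bxor data 4294967295
  -- _TABLE[crc & 0xFF]: the index is always in [0,256), so the `.getD 0` default is unreachable
  PySem.Int.bxor (crc >>> (8:Nat)) ((PySem.List.pyGet? crcTable (PySem.Int.band crc 255)).getD 0)

-- ===== PRECONDITION & SPEC =====
def Spec_level4_crc_like (data : Int) (out : Int) : Prop := out = level4_crc_like_alt data
instance (data : Int) (out : Int) : Decidable (Spec_level4_crc_like data out) := by unfold Spec_level4_crc_like; infer_instance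

-- ===== CLAIM (what is proved, stated in full; the proofs are below) =====
def Claim_equal_level4_crc_like : Prop := ∀ (data : Int), Dom_level4_crc_like data → Spec_level4_crc_like data (level4_crc_like data)

-- ===== LEMMAS AND PROOFS =====

-- the CRC step, written as a pure xor/shift function on Int
def crcF (c : Int) : Int := Int.xor (c >>> (1:Nat)) (if c.testBit 0 then 3988292384 else 0)

-- extensionality of Int by two's-complement bits
theorem int_ext {a b : Int} (h : ∀ i : Nat, a.testBit i = b.testBit i) : a = b := by
  cases a with
  | ofNat m => cases b with
    | ofNat n =>
      have := Nat.eq_of_testBit_eq (x := m) (y := n) (fun i => by simpa [Int.testBit] using h i)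
      simp [this]
    | negSucc n =>
      exfalso
      have h1 := h (max m n)
      have hm : m.testBit (max m n) = false := Nat.testBit_lt_two_pow (lt_of_le_of_lt (le_max_left m n) Nat.lt_two_pow_self)
      have hn : n.testBit (max m n) = false := Nat.testBit_lt_two_pow (lt_of_le_of_lt (le_max_right m n) Nat.lt_two_pow_self)
      simp [Int.testBit, hm, hn] at h1
  | negSucc m => cases b with
    | ofNat n =>
      exfalso
      have h1 := h (max m n)
      have hm : m.testBit (max m n) = false := Nat.testBit_lt_two_pow (lt_of_le_of_lt (le_max_left m n) Nat.lt_two_pow_self)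
      have hn : n.testBit (max m n) = false := Nat.testBit_lt_two_pow (lt_of_le_of_lt (le_max_right m n) Nat.lt_two_pow_self)
      simp [Int.testBit, hm, hn] at h1
    | negSucc n =>
      have := Nat.eq_of_testBit_eq (x := m) (y := n) (fun i => by have := h i; simpa [Int.testBit] using this)
      simp [this]

theorem testBit_shiftRight_int (a : Int) (k i : Nat) : (a >>> k).testBit i = a.testBit (k + i) := by
  cases a with
  | ofNat m =>
    show (Int.ofNat (m >>> k)).testBit i = _
    simp [Int.testBit, Nat.testBit_shiftRight]
  | negSucc m =>
    show (Int.negSucc (m >>> k)).testBit i = _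
    simp [Int.testBit, Nat.testBit_shiftRight]

theorem testBit_zero_int (i : Nat) : Int.testBit 0 i = false := by
  simp [Int.testBit]

theorem xor_zero_int (a : Int) : Int.xor a 0 = a :=
  int_ext (fun i => by simp [Int.testBit_lxor, testBit_zero_int])

theorem xor_shiftRight (a b : Int) (k : Nat) :
    (Int.xor a b) >>> k = Int.xor (a >>> k) (b >>> k) :=
  int_ext (fun i => by simp [testBit_shiftRight_int, Int.testBit_lxor])

-- bridges from PySem's bitwise primitives to Mathlib's Int.xor / Int.land
theorem negSucc_nonneg_false (m : Nat) : ¬ (0 ≤ Int.negSucc m) := by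
  simp [Int.negSucc_eq]; omega

theorem neg_negSucc_sub_one_toNat (m : Nat) : (-Int.negSucc m - 1).toNat = m := by
  simp [Int.negSucc_eq]

theorem neg_cast_sub_one (x : Nat) : -(x:Int) - 1 = Int.negSucc x := by
  simp [Int.negSucc_eq]; omega

theorem bxor_eq_xor (a b : Int) : PySem.Int.bxor a b = Int.xor a b := by
  cases a with
  | ofNat m => cases b with
    | ofNat n => simp [PySem.Int.bxor, Int.xor]
    | negSucc n =>
      simp [PySem.Int.bxor, Int.xor, negSucc_nonneg_false, neg_negSucc_sub_one_toNat, neg_cast_sub_one]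
  | negSucc m => cases b with
    | ofNat n =>
      simp [PySem.Int.bxor, Int.xor, negSucc_nonneg_false, neg_negSucc_sub_one_toNat, neg_cast_sub_one]
    | negSucc n =>
      simp [PySem.Int.bxor, Int.xor, negSucc_nonneg_false, neg_negSucc_sub_one_toNat]

theorem zero_ldiff (n : Nat) : Nat.ldiff 0 n = 0 :=
  Nat.eq_of_testBit_eq (fun i => by simp [Nat.testBit_ldiff])

theorem and_add_ldiff (m : Nat) : ∀ n : Nat, (m &&& n) + m.ldiff n = m := by
  induction m using Nat.binaryRec with
  | zero => intro n; simp [zero_ldiff]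
  | bit b m ih =>
    intro n
    conv_lhs => rw [← Nat.bit_bodd_div2 n]
    rw [Nat.land_bit, Nat.ldiff_bit]
    have h1 := ih n.div2
    cases b <;> cases hb : n.bodd <;>
      simp [Nat.bit_val] <;> omega

theorem sub_and_eq_ldiff (m n : Nat) : m - (m &&& n) = m.ldiff n := by
  have := and_add_ldiff m n; omega

theorem band_eq_land (a b : Int) : PySem.Int.band a b = Int.land a b := by
  cases a with
  | ofNat m => cases b with
    | ofNat n => simp [PySem.Int.band, Int.land]
    | negSucc n =>
      simp [PySem.Int.band, Int.land, negSucc_nonneg_false, neg_negSucc_sub_one_toNat, sub_and_eq_ldiff]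
  | negSucc m => cases b with
    | ofNat n =>
      simp [PySem.Int.band, Int.land, negSucc_nonneg_false, neg_negSucc_sub_one_toNat, sub_and_eq_ldiff]
    | negSucc n =>
      simp [PySem.Int.band, Int.land, negSucc_nonneg_false, neg_negSucc_sub_one_toNat, neg_cast_sub_one]

theorem land_one_eq (c : Int) : Int.land c 1 = if c.testBit 0 then 1 else 0 := by
  cases c with
  | ofNat m =>
    show (Int.ofNat (m &&& 1)) = _
    rw [Nat.and_one_is_mod]
    rcases Nat.mod_two_eq_zero_or_one m with h | h <;>
      simp [Int.testBit, Nat.testBit_zero, h]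
  | negSucc m =>
    show (Int.ofNat ((1:Nat).ldiff m)) = _
    have : (1:Nat).ldiff m = if m.testBit 0 then 0 else 1 := by
      apply Nat.eq_of_testBit_eq
      intro i
      rw [Nat.testBit_ldiff]
      rcases Nat.eq_zero_or_pos i with rfl | hi
      · cases h : m.testBit 0 <;> simp [h]
      · have h1 : (1:Nat).testBit i = false := by
          have : (1:Nat) < 2 ^ i := by
            calc (1:Nat) < 2 ^ 1 := by norm_num
            _ ≤ 2 ^ i := Nat.pow_le_pow_right (by norm_num) hi
          exact Nat.testBit_lt_two_pow this
        cases h : m.testBit 0 <;> simp [h, h1]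
    rw [this]
    cases h : m.testBit 0 <;> simp [Int.testBit, h]

theorem testBit_255 (i : Nat) : (255 : Int).testBit i = decide (i < 8) := by
  have h0 : (255 : Int).testBit i = (255 : Nat).testBit i := rfl
  rw [h0, show (255 : Nat) = 2 ^ 8 - 1 from by norm_num, Nat.testBit_two_pow_sub_one]

theorem pyRange_256 : PySem.List.pyRange 0 256 1 = List.map (fun k : Nat => (k : Int)) (List.range 256) := by
  have h := PySem.List.pyRange_zero_natCast 256
  simpa using h

theorem pyRange_8 : PySem.List.pyRange 0 8 1 = [0, 1, 2, 3, 4, 5, 6, 7] := by decide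

-- the loop body IS crcF
theorem body_eq_crcF (c : Int) :
    (if PySem.Int.band c 1 ≠ 0 then PySem.Int.bxor (c >>> (1:Nat)) 3988292384 else c >>> (1:Nat)) = crcF c := by
  rw [band_eq_land, land_one_eq, bxor_eq_xor]
  unfold crcF
  cases h : c.testBit 0 <;> simp [h]
  exact (int_ext (fun i => by simp [Int.testBit_lxor, testBit_zero_int])).symm

theorem loop8_eq_iter (c : Int) : byteCrc c = crcF^[8] c := by
  unfold byteCrc
  rw [pyRange_8]
  simp only [List.foldl, body_eq_crcF]
  rfl

-- crcF is GF(2)-linear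
theorem crcF_linear (a b : Int) : crcF (Int.xor a b) = Int.xor (crcF a) (crcF b) := by
  unfold crcF
  rw [xor_shiftRight, show (Int.xor a b).testBit 0 = (a.testBit 0 ^^ b.testBit 0) from Int.testBit_lxor a b 0]
  apply int_ext
  intro i
  cases h1 : a.testBit 0 <;> cases h2 : b.testBit 0 <;>
    cases hK : (3988292384 : Int).testBit i <;>
    simp [Int.testBit_lxor, testBit_zero_int, h1, h2, hK]

theorem iter_linear (k : Nat) (a b : Int) :
    crcF^[k] (Int.xor a b) = Int.xor (crcF^[k] a) (crcF^[k] b) := by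
  induction k with
  | zero => simp
  | succ n ih => simp [Function.iterate_succ_apply', ih, crcF_linear]

-- on an int whose low k bits are 0, k CRC steps are a pure shift
theorem iter_hi (k : Nat) (c : Int) (h : ∀ i, i < k → c.testBit i = false) :
    crcF^[k] c = c >>> k := by
  induction k generalizing c with
  | zero => simp [Int.shiftRight_zero]
  | succ n ih =>
    rw [Function.iterate_succ_apply]
    have hc : crcF c = c >>> (1:Nat) := by
      unfold crcF
      rw [h 0 (by omega), if_neg (by simp), xor_zero_int]
    rw [hc, ih (c >>> (1:Nat)) (fun i hi => by rw [testBit_shiftRight_int]; exact h (1 + i) (by omega))]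
    apply int_ext
    intro i
    rw [testBit_shiftRight_int, testBit_shiftRight_int, testBit_shiftRight_int]
    congr 1
    omega

theorem land255_nonneg_lt (c : Int) : ∃ l : Nat, Int.land c 255 = (l : Int) ∧ l < 256 := by
  cases c with
  | ofNat m =>
    refine ⟨m &&& 255, rfl, ?_⟩
    have := Nat.and_le_right (n := m) (m := 255)
    omega
  | negSucc m =>
    refine ⟨(255:Nat).ldiff m, rfl, ?_⟩
    have h := and_add_ldiff 255 m
    omega

theorem table_lookup (l : Nat) (h : l < 256) :
    ((PySem.List.pyGet? crcTable (l : Int)).getD 0) = byteCrc (l : Int) := by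
  rw [PySem.List.pyGet?_natCast]
  unfold crcTable
  rw [pyRange_256, List.map_map, List.getElem?_map, List.getElem?_range h]
  rfl

-- the table-driven identity: 8 CRC steps = shift by a byte XOR table entry of the low byte
theorem main_identity (c : Int) :
    crcF^[8] c = Int.xor (c >>> (8:Nat)) (byteCrc (Int.land c 255)) := by
  set lo := Int.land c 255 with hlo
  have hlobit : ∀ i : Nat, lo.testBit i = (c.testBit i && decide (i < 8)) := by
    intro i; rw [hlo, Int.testBit_land, testBit_255]
  have hdecomp : Int.xor (Int.xor c lo) lo = c := by
    apply int_ext; intro i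
    simp [Int.testBit_lxor, Bool.xor_assoc]
  have hhibit : ∀ i, i < 8 → (Int.xor c lo).testBit i = false := by
    intro i hi
    rw [Int.testBit_lxor, hlobit i]
    simp [hi]
  have hhishift : (Int.xor c lo) >>> (8:Nat) = c >>> (8:Nat) := by
    apply int_ext; intro i
    rw [testBit_shiftRight_int, testBit_shiftRight_int, Int.testBit_lxor, hlobit]
    simp
  calc crcF^[8] c = crcF^[8] (Int.xor (Int.xor c lo) lo) := by rw [hdecomp]
    _ = Int.xor (crcF^[8] (Int.xor c lo)) (crcF^[8] lo) := iter_linear 8 _ _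
    _ = Int.xor (c >>> (8:Nat)) (byteCrc lo) := by
        rw [iter_hi 8 _ hhibit, hhishift, loop8_eq_iter]

-- ===== VERDICT (by name: the statement is the Claim_ definition above) =====
theorem level4_crc_like_spec : Claim_equal_level4_crc_like := by
  intro data _
  unfold Spec_level4_crc_like level4_crc_like level4_crc_like_alt
  rw [ite_self]
  obtain ⟨l, hl, hl256⟩ := land255_nonneg_lt (PySem.Int.bxor data 4294967295)
  show byteCrc (PySem.Int.bxor data 4294967295) =
    PySem.Int.bxor ((PySem.Int.bxor data 4294967295) >>> (8:Nat))
      ((PySem.List.pyGet? crcTable (PySem.Int.band (PySem.Int.bxor data 4294967295) 255)).getD 0)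
  rw [loop8_eq_iter, band_eq_land, hl, table_lookup l hl256, ← hl, bxor_eq_xor, main_identity]
  rw [bxor_eq_xor]
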